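-- pv_equiv track=rewrite | github.com/LeandroCantero/EstDeDatos_Ejercicios | EjExtra2/punto1.py | cucarachasEdificio
-- ===== SOURCE A (Python) =====
-- def cucarachasEdificio(pisos):
--     cucarachas = 0
--     if pisos == 1:
--         cucarachas = 1
--     elif pisos % 2 == 0:
--         cucarachas = pisos*2
--     else:
--         cucarachas = cucarachasEdificio(pisos-2)+cucarachasEdificio(pisos-1)
--     return cucarachas
-- ===== SOURCE B (Python) =====
-- def cucarachasEdificio(pisos):
--     if pisos % 2 == 0:
--         return pisos * 2
--     k = (pisos - 1) // 2
--     return 1 + 2 * k * (k + 1)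
-- ===== Notes on version B (the rewrite author's own statement) =====
-- stated objective: faster
-- what changed: Replaces the linear recursion with a closed form: even floors give 2n, odd floors 2k+1 give 1+2k(k+1), obtained by summing the even-floor contributions of the recursion.
import Mathlib
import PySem

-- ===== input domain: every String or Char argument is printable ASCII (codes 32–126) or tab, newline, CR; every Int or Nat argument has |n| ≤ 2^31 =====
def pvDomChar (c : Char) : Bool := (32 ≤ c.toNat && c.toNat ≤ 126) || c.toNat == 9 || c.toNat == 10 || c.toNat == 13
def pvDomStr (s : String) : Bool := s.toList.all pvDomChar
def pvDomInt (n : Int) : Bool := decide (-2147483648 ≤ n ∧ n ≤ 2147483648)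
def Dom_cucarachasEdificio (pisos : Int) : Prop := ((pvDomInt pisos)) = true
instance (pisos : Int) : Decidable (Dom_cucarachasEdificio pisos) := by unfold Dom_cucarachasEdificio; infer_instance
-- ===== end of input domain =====

-- B replaces A's linear recursion by the closed form (even n → 2n, odd n = 2k+1 → 1+2k(k+1)): asymptotically faster.


-- ===== PORT A =====
-- helper carrying A's recursion for pisos ≥ 1 (the only values the Python recursion reaches inside Pre_)
def cucaAux : Nat → Int
  | 0 => 0          -- unreachable inside Pre_ (kept only for totality)
  | 1 => 1
  | n + 2 =>
      if ((n : Int) + 2) % 2 = 0 then ((n : Int) + 2) * 2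
      else cucaAux n + cucaAux (n + 1)

def cucarachasEdificio (pisos : Int) : Int :=
  if pisos = 1 then 1
  else if pisos % 2 = 0 then pisos * 2
  else cucaAux (pisos - 2).toNat + cucaAux (pisos - 1).toNat

-- ===== PORT B =====
def cucarachasEdificio_alt (pisos : Int) : Int :=
  if pisos % 2 = 0 then pisos * 2
  else
    let k := PySem.Int.floordiv (pisos - 1) 2
    1 + 2 * k * (k + 1)

-- ===== PRECONDITION & SPEC =====
-- Pre_ excludes odd pisos < 1, on which A's recursion never reaches a base case and raises RecursionError
-- (B returns the closed-form value there, but nothing is claimed).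
def Pre_cucarachasEdificio (pisos : Int) : Prop := pisos % 2 = 0 ∨ 1 ≤ pisos
instance (pisos : Int) : Decidable (Pre_cucarachasEdificio pisos) := by unfold Pre_cucarachasEdificio; infer_instance
def pvWitness_cucarachasEdificio : Int := 7

def Spec_cucarachasEdificio (pisos : Int) (out : Int) : Prop := out = cucarachasEdificio_alt pisos
instance (pisos : Int) (out : Int) : Decidable (Spec_cucarachasEdificio pisos out) := by unfold Spec_cucarachasEdificio; infer_instance

-- ===== CLAIM (what is proved, stated in full; the proofs are below) =====
def Claim_equal_cucarachasEdificio : Prop := ∀ (pisos : Int), Dom_cucarachasEdificio pisos → Pre_cucarachasEdificio pisos → Spec_cucarachasEdificio pisos (cucarachasEdificio pisos)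

-- ===== LEMMAS AND PROOFS =====
lemma cucaAux_odd (k : Nat) : cucaAux (2 * k + 1) = 1 + 2 * k * (k + 1) := by
  induction k with
  | zero => simp [cucaAux]
  | succ k ih =>
      have h : 2 * (k + 1) + 1 = (2 * k + 1) + 2 := by omega
      rw [h]
      have heven : 2 * k + 2 = (2 * k) + 2 := by omega
      simp only [cucaAux]
      have hodd : ¬ (((2 * k + 1 : Nat) : Int) + 2) % 2 = 0 := by omega
      rw [if_neg hodd]
      have hev : (((2 * k : Nat) : Int) + 2) % 2 = 0 := by omega
      rw [if_pos hev, ih]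
      push_cast
      ring

-- ===== VERDICT (by name: the statement is the Claim_ definition above) =====
theorem cucarachasEdificio_spec : Claim_equal_cucarachasEdificio := by
  intro pisos _ hpre
  unfold Spec_cucarachasEdificio cucarachasEdificio cucarachasEdificio_alt
  by_cases h1 : pisos = 1
  · subst h1
    norm_num [PySem.Int.floordiv]
  · rw [if_neg h1]
    by_cases he : pisos % 2 = 0
    · rw [if_pos he, if_pos he]
    · rw [if_neg he, if_neg he]
      -- pisos is odd and ≥ 3
      have hge : 3 ≤ pisos := by
        rcases hpre with h | h
        · exact absurd h he
        · omega
      obtain ⟨k, hk⟩ : ∃ k : Nat, pisos = 2 * (k : Int) + 3 := by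
        refine ⟨(pisos - 3).toNat / 2, ?_⟩
        omega
      have h2 : (pisos - 2).toNat = 2 * k + 1 := by omega
      have h3 : (pisos - 1).toNat = (2 * k) + 2 := by omega
      rw [h2, h3, cucaAux_odd]
      have h4 : cucaAux (2 * k + 2) = ((2 * k : Nat) : Int) + 2 + (((2 * k : Nat) : Int) + 2) := by
        have : 2 * k + 2 = (2 * k) + 2 := rfl
        simp only [cucaAux]
        have : (((2 * k : Nat) : Int) + 2) % 2 = 0 := by omega
        rw [if_pos this]; ring
      rw [h4]
      have h5 : PySem.Int.floordiv (pisos - 1) 2 = (k : Int) + 1 := by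
        rw [PySem.Int.floordiv_eq_ediv_of_pos (by omega)]
        omega
      rw [h5]
      push_cast
      ring
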